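-- pv_equiv track=rewrite | github.com/Theophilis/C.H.A.O.S | C.H.A.O.S/Chaodelia/chaodelia.py | decimal
-- ===== SOURCE A (Python) =====
-- def decimal(n, b):
--
--     n = list(reversed(n))
--     n = [int(v) for v in n]
--
--     value = 0
--     place = 0
--
--
--     for c in n:
--
--         value += int(c) * b ** place
--         place += 1
--
--     return value
-- ===== SOURCE B (Python) =====
-- def decimal(n, b):
--     # Horner's method: one pass, O(len(n)) multiplications instead of b**place each step
--     value = 0
--     for d in n:
--         value = value * b + int(d)
--     return value
-- ===== Notes on version B (the rewrite author's own statement) =====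
-- stated objective: faster
-- what changed: Replaced the reversed-list loop computing b**place at every step with a single Horner pass value = value*b + digit.
import Mathlib
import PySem

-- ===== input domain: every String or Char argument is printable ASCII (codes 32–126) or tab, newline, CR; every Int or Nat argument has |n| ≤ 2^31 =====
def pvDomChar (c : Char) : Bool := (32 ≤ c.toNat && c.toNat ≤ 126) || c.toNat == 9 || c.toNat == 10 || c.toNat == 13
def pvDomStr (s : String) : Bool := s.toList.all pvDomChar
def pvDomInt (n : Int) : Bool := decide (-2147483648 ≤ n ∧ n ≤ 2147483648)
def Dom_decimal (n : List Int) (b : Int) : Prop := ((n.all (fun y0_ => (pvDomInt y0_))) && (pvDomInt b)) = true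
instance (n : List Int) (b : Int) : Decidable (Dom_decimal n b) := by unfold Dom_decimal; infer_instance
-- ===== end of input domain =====

-- B replaces A's reversed loop with a per-step power b**place by a single Horner pass (value = value*b + digit); objective: faster.

-- ===== PORT A =====
-- A's loop over the reversed list, carrying (value, place): value += c * b ** place; place += 1
def decimalLoop (b : Int) : List Int → Int → Nat → Int
  | [], value, _ => value
  | c :: t, value, place => decimalLoop b t (value + c * b ^ place) (place + 1)

def decimal (n : List Int) (b : Int) : Int :=
  decimalLoop b n.reverse 0 0

-- ===== PORT B =====
def decimal_alt (n : List Int) (b : Int) : Int :=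
  n.foldl (fun value d => value * b + d) 0

-- ===== PRECONDITION & SPEC =====
def Spec_decimal (n : List Int) (b : Int) (out : Int) : Prop := out = decimal_alt n b
instance (n : List Int) (b : Int) (out : Int) : Decidable (Spec_decimal n b out) := by unfold Spec_decimal; infer_instance

-- ===== CLAIM (what is proved, stated in full; the proofs are below) =====
def Claim_equal_decimal : Prop := ∀ (n : List Int) (b : Int), Dom_decimal n b → Spec_decimal n b (decimal n b)

-- ===== LEMMAS AND PROOFS =====
-- the little-endian polynomial value of a digit list
def polyval (b : Int) : List Int → Int
  | [] => 0
  | c :: t => c + b * polyval b t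

theorem decimalLoop_eq (b : Int) (l : List Int) : ∀ (v : Int) (p : Nat),
    decimalLoop b l v p = v + b ^ p * polyval b l := by
  induction l with
  | nil => intro v p; simp [decimalLoop, polyval]
  | cons c t ih =>
    intro v p
    simp only [decimalLoop, polyval, ih]
    ring

theorem polyval_append_single (b : Int) (l : List Int) (c : Int) :
    polyval b (l ++ [c]) = polyval b l + c * b ^ l.length := by
  induction l with
  | nil => simp [polyval]
  | cons d t ih => simp [polyval, ih]; ring

theorem horner_eq (b : Int) (l : List Int) : ∀ (v : Int),
    l.foldl (fun value d => value * b + d) v = v * b ^ l.length + polyval b l.reverse := by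
  induction l with
  | nil => intro v; simp [polyval]
  | cons c t ih =>
    intro v
    simp only [List.foldl, ih, List.reverse_cons, polyval_append_single,
      List.length_reverse, List.length_cons]
    ring

-- ===== VERDICT (by name: the statement is the Claim_ definition above) =====
theorem decimal_spec : Claim_equal_decimal := by
  intro n b _
  unfold Spec_decimal decimal decimal_alt
  rw [decimalLoop_eq, horner_eq]
  simp
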